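-- pv_equiv track=rewrite | github.com/pypi-data/pypi-mirror-404 | packages/appxploit/appxploit-1.0.1.tar.gz/appxploit-1.0.1/appxploit/reporting/generator.py | _format_secrets
-- ===== SOURCE A (Python) =====
-- def _format_secrets(secrets: list) -> str:
--     """Format secrets section"""
--     if not secrets:
--         return "*No secrets discovered.*\n"
--
--     # Group by severity
--     by_severity = {}
--     for secret in secrets:
--         severity = secret.get('severity', 'medium')
--         if severity not in by_severity:
--             by_severity[severity] = []
--         by_severity[severity].append(secret)
--
--     output = f"**Total Secrets:** {len(secrets)}\n\n"
--
--     for severity in ['critical', 'high', 'medium']: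
--         if severity not in by_severity:
--             continue
--
--         secs = by_severity[severity]
--         output += f"### {severity.upper()} ({len(secs)})\n\n"
--
--         for secret in secs[:10]:  # Limit to 10 per severity
--             output += f"- **{secret['type'].replace('_', ' ').title()}** in `{secret['file']}`\n"
--
--         if len(secs) > 10:
--             output += f"\n*...and {len(secs) - 10} more*\n"
--
--         output += "\n"
--
--     return output
-- ===== SOURCE B (Python) =====
-- def _format_secrets(secrets: list) -> str:
--     """Format secrets section"""
--     if not secrets:
--         return "*No secrets discovered.*\n"
--
--     out = f"**Total Secrets:** {len(secrets)}\n\n"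
--
--     # No grouping dict: filter the input once per severity, headers precomputed.
--     for sev, label in (('critical', 'CRITICAL'), ('high', 'HIGH'), ('medium', 'MEDIUM')):
--         secs = [s for s in secrets if s.get('severity', 'medium') == sev]
--         if not secs:
--             continue
--         section = f"### {label} ({len(secs)})\n\n"
--         for s in secs[:10]:
--             section += f"- **{s['type'].replace('_', ' ').title()}** in `{s['file']}`\n"
--         if len(secs) > 10:
--             section += f"\n*...and {len(secs) - 10} more*\n"
--         out += section + "\n"
--
--     return out
-- ===== Notes on version B (the rewrite author's own statement) =====
-- stated objective: simpler
-- what changed: Drops the severity-grouping dict (and the runtime .upper() call): B filters the input list once per severity inside the output loop, iterating over precomputed (severity, LABEL) pairs and building each section as a local string.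
import Mathlib
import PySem

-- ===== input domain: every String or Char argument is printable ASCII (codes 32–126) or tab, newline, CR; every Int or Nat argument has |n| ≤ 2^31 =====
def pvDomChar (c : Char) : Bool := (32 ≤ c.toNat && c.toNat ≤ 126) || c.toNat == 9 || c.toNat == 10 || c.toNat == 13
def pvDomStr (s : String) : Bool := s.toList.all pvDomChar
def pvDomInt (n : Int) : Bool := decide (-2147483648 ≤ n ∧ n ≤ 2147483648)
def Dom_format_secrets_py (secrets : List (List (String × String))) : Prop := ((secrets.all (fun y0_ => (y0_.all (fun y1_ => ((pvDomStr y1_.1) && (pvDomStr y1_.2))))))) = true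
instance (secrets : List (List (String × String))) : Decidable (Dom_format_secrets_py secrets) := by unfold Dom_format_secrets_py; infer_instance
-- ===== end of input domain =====

-- B drops A's severity-grouping dict: it filters the list once per severity (with precomputed
-- uppercase labels) and builds each section as a local string. Equivalence is about the return
-- value; neither program mutates its argument.

-- ===== PORT A =====
-- shared helpers (the corresponding Python expressions are identical in Source A and Source B)

-- d.get(k, dflt) on a dict given as an association list: first match.
def pyGetStrD (d : List (String × String)) (k dflt : String) : String :=
  ((d.find? (fun p => p.1 == k)).map Prod.snd).getD dflt

-- secret.get('severity', 'medium')
def sevOf (s : List (String × String)) : String := pyGetStrD s "severity" "medium"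

-- str.title() ported by hand over List Char: a character is uppercased iff the previous
-- character is not a letter, lowercased otherwise (exact on the ASCII domain, where the
-- cased characters are exactly the letters).
def titleChars : List Char → Bool → List Char
  | [], _ => []
  | c :: cs, prevAlpha =>
    (if prevAlpha then PySem.Chars.lowerChar c else PySem.Chars.upperChar c)
      :: titleChars cs (PySem.Chars.isalpha c)

def pyTitle (s : String) : String := String.ofList (titleChars s.toList false)

-- f"- **{secret['type'].replace('_',' ').title()}** in `{secret['file']}`\n".
-- secret['type'] / secret['file'] raise KeyError when the key is absent; Pre_ excludes exactly
-- those inputs, so on admitted inputs the "" default below is never taken.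
def bulletLine (sec : List (String × String)) : String :=
  "- **" ++ pyTitle (PySem.Str.replace (pyGetStrD sec "type" "") "_" " ") ++ "** in `"
    ++ pyGetStrD sec "file" "" ++ "`\n"

-- one grouping step of A's first loop (append to the severity's bucket, creating it if absent)
def groupStep (d : PySem.Dict String (List (List (String × String))))
    (sec : List (String × String)) : PySem.Dict String (List (List (String × String))) :=
  d.modify (sevOf sec) [] (fun l => l ++ [sec])

-- the body of A's output loop over ['critical','high','medium']
def sectA (bySev : PySem.Dict String (List (List (String × String))))
    (output sev : String) : String :=
  if bySev.contains sev = false then output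
  else
    let secs := bySev.getD sev []
    let output := output ++ "### " ++ PySem.Str.upper sev ++ " ("
      ++ PySem.Int.toStr (secs.length : Int) ++ ")\n\n"
    let output := (PySem.List.slice secs none (some 10)).foldl
      (fun o sec => o ++ bulletLine sec) output
    let output := if (10 : Int) < (secs.length : Int) then
        output ++ "\n*...and " ++ PySem.Int.toStr ((secs.length : Int) - 10) ++ " more*\n"
      else output
    output ++ "\n"

def format_secrets_py (secrets : List (List (String × String))) : String :=
  if secrets.isEmpty then "*No secrets discovered.*\n"
  else
    let bySev := secrets.foldl groupStep PySem.Dict.empty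
    let out0 := "**Total Secrets:** " ++ PySem.Int.toStr (secrets.length : Int) ++ "\n\n"
    ["critical", "high", "medium"].foldl (sectA bySev) out0

-- ===== PORT B =====
-- the body of B's loop over the (severity, LABEL) pairs
def sectB (secrets : List (List (String × String))) (out : String)
    (pr : String × String) : String :=
  let secs := secrets.filter (fun s => sevOf s == pr.1)
  if secs.isEmpty then out
  else
    let section0 := "### " ++ pr.2 ++ " (" ++ PySem.Int.toStr (secs.length : Int) ++ ")\n\n"
    let section1 := (PySem.List.slice secs none (some 10)).foldl
      (fun o s => o ++ bulletLine s) section0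
    let section2 := if (10 : Int) < (secs.length : Int) then
        section1 ++ "\n*...and " ++ PySem.Int.toStr ((secs.length : Int) - 10) ++ " more*\n"
      else section1
    out ++ (section2 ++ "\n")

def format_secrets_py_alt (secrets : List (List (String × String))) : String :=
  if secrets.isEmpty then "*No secrets discovered.*\n"
  else
    [("critical", "CRITICAL"), ("high", "HIGH"), ("medium", "MEDIUM")].foldl
      (sectB secrets)
      ("**Total Secrets:** " ++ PySem.Int.toStr (secrets.length : Int) ++ "\n\n")

-- ===== PRECONDITION & SPEC =====
-- Pre_ excludes exactly the inputs on which the Python raises KeyError: a secret that is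
-- actually rendered (among the first 10 of its severity group, for the three listed
-- severities) but lacks a 'type' or 'file' key.
def Pre_format_secrets_py (secrets : List (List (String × String))) : Prop :=
  ∀ sev ∈ (["critical", "high", "medium"] : List String),
    ∀ s ∈ (secrets.filter (fun x => sevOf x == sev)).take 10,
      (s.any (fun p => p.1 == "type")) = true ∧ (s.any (fun p => p.1 == "file")) = true
instance (secrets : List (List (String × String))) : Decidable (Pre_format_secrets_py secrets) := by
  unfold Pre_format_secrets_py; infer_instance

def pvWitness_format_secrets_py : (List (List (String × String))) :=
  [[("severity", "high"), ("type", "api_key"), ("file", "app.py")], [("type", "aws_secret"), ("file", "lib/u.js")]]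

def Spec_format_secrets_py (secrets : List (List (String × String))) (out : String) : Prop := out = format_secrets_py_alt secrets
instance (secrets : List (List (String × String))) (out : String) : Decidable (Spec_format_secrets_py secrets out) := by unfold Spec_format_secrets_py; infer_instance

-- ===== CLAIM (what is proved, stated in full; the proofs are below) =====
def Claim_equal_format_secrets_py : Prop := ∀ (secrets : List (List (String × String))), Dom_format_secrets_py secrets → Pre_format_secrets_py secrets → Spec_format_secrets_py secrets (format_secrets_py secrets)

-- ===== LEMMAS AND PROOFS =====

theorem witness_ok : Dom_format_secrets_py pvWitness_format_secrets_py ∧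
    Pre_format_secrets_py pvWitness_format_secrets_py := by
  constructor <;> decide

-- the bucket of A's grouping dict is exactly the per-severity filter of B
theorem fold_getD (l : List (List (String × String)))
    (d : PySem.Dict String (List (List (String × String)))) (sev : String) :
    (l.foldl groupStep d).getD sev [] = d.getD sev [] ++ l.filter (fun s => sevOf s == sev) := by
  induction l generalizing d with
  | nil => simp
  | cons h t ih =>
    simp only [List.foldl_cons, List.filter_cons, ih, groupStep, PySem.Dict.getD_modify]
    by_cases hs : sev = sevOf h
    · simp [hs]
    · have : (sevOf h == sev) = false := by simp [Ne.symm hs]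
      simp [hs, this]

theorem fold_contains (l : List (List (String × String)))
    (d : PySem.Dict String (List (List (String × String)))) (sev : String) :
    (l.foldl groupStep d).contains sev = (d.contains sev || l.any (fun s => sevOf s == sev)) := by
  induction l generalizing d with
  | nil => simp
  | cons h t ih =>
    simp only [List.foldl_cons, List.any_cons, ih, groupStep, PySem.Dict.contains_modify]
    by_cases hs : sev = sevOf h
    · simp [hs]
    · have h1 : (sev == sevOf h) = false := by simp [hs]
      have h2 : (sevOf h == sev) = false := by simp [Ne.symm hs]
      simp [h1, h2]

theorem str_append_assoc (a b c : String) : a ++ b ++ c = a ++ (b ++ c) :=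
  String.append_assoc

-- an accumulating string fold factors through a common prefix
theorem foldl_bullets_prefix (l : List (List (String × String))) (pre s : String) :
    l.foldl (fun o x => o ++ bulletLine x) (pre ++ s)
      = pre ++ l.foldl (fun o x => o ++ bulletLine x) s := by
  induction l generalizing s with
  | nil => rfl
  | cons h t ih => simp only [List.foldl_cons, str_append_assoc, ih]

-- A's section step equals B's, given the precomputed uppercase label
theorem sect_eq (secrets : List (List (String × String))) (out sev label : String)
    (hl : PySem.Str.upper sev = label) :
    sectA (secrets.foldl groupStep PySem.Dict.empty) out sev
      = sectB secrets out (sev, label) := by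
  unfold sectA sectB
  rw [fold_contains, fold_getD]
  simp only [PySem.Dict.contains_empty, PySem.Dict.getD_empty, Bool.false_or, List.nil_append, hl]
  by_cases hany : secrets.any (fun s => sevOf s == sev) = true
  · have hne : (secrets.filter (fun s => sevOf s == sev)).isEmpty = false := by
      rcases List.any_eq_true.mp hany with ⟨x, hx, hpx⟩
      simp only [List.isEmpty_eq_false_iff, ne_eq, List.filter_eq_nil_iff, not_forall]
      exact ⟨x, hx, by simp [hpx]⟩
    simp only [hany, Bool.true_eq_false, if_false, hne]
    set secs := secrets.filter (fun s => sevOf s == sev)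
    have h1 : out ++ "### " ++ label ++ " (" ++ PySem.Int.toStr (secs.length : Int) ++ ")\n\n"
        = out ++ ("### " ++ label ++ " (" ++ PySem.Int.toStr (secs.length : Int) ++ ")\n\n") := by
      simp [str_append_assoc]
    rw [h1, foldl_bullets_prefix]
    split
    · simp [str_append_assoc]
    · simp [str_append_assoc]
  · have hb : secrets.any (fun s => sevOf s == sev) = false := by
      exact Bool.eq_false_iff.mpr (fun h => hany h)
    have he : (secrets.filter (fun s => sevOf s == sev)).isEmpty = true := by
      simp only [List.isEmpty_iff, List.filter_eq_nil_iff]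
      intro x hx hpx
      exact hany (List.any_eq_true.mpr ⟨x, hx, by simp_all⟩)
    simp [hb, he]

-- ===== VERDICT (by name: the statement is the Claim_ definition above) =====
theorem format_secrets_py_spec : Claim_equal_format_secrets_py := by
  intro secrets _ _
  unfold Spec_format_secrets_py format_secrets_py format_secrets_py_alt
  by_cases h : secrets.isEmpty
  · simp [h]
  · simp only [h, List.foldl_cons, List.foldl_nil]
    rw [sect_eq secrets _ "critical" "CRITICAL" rfl,
        sect_eq secrets _ "high" "HIGH" rfl,
        sect_eq secrets _ "medium" "MEDIUM" rfl]
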